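-- pv_equiv track=rewrite | github.com/joshcwainwright/GeorgiaTechCoursework | CS1301/HW09.py | friendsgiving
-- ===== SOURCE A (Python) =====
-- def friendsgiving(lst,bud,dist):
--     if lst==[]:
--         return{}
--     dic=friendsgiving(lst[1:],bud,dist)
--     if lst[0][1]<bud:
--         if lst[0][2]<dist:
--             dic[lst[0][0]]=lst[0][1]
--     return dic
-- ===== SOURCE B (Python) =====
-- def friendsgiving(lst, bud, dist):
--     dic = {}
--     for item in reversed(lst):
--         if item[1] < bud and item[2] < dist:
--             dic[item[0]] = item[1]
--     return dic
-- ===== Notes on version B (the rewrite author's own statement) =====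
-- stated objective: simpler
-- what changed: Replaces A's tail-first recursion (each call rebuilds the dict of the tail, then inserts the head) with a single iterative pass over the reversed list into one dict, preserving earliest-wins overwrite order.
import Mathlib
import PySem

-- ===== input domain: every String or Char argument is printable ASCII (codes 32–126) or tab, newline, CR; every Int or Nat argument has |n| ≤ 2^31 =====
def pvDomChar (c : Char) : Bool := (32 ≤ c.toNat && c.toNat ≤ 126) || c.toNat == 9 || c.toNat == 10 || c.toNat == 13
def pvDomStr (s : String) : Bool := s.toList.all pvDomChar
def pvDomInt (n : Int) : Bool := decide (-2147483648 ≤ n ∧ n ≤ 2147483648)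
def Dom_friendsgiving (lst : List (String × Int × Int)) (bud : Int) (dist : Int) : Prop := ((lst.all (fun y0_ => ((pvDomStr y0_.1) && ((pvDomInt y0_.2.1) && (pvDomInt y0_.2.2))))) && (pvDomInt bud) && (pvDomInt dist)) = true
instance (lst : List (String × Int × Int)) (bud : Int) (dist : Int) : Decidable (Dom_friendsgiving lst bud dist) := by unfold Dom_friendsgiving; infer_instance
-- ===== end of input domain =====

-- ===== PORT A =====
-- A: recursion on the list; dict built from the tail, then the head inserted if it passes.
def friendsgivingRec (lst : List (String × Int × Int)) (bud : Int) (dist : Int) : PySem.Dict String Int :=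
  match lst with
  | [] => PySem.Dict.empty
  | x :: rest =>
    let dic := friendsgivingRec rest bud dist
    if x.2.1 < bud then
      if x.2.2 < dist then dic.insert x.1 x.2.1 else dic
    else dic

def friendsgiving (lst : List (String × Int × Int)) (bud : Int) (dist : Int) : List (String × Int) :=
  (friendsgivingRec lst bud dist).items

-- ===== PORT B =====
-- B: one iterative pass over the reversed list, inserting passing items into a dict.
def friendsgiving_alt (lst : List (String × Int × Int)) (bud : Int) (dist : Int) : List (String × Int) :=
  (lst.reverse.foldl
    (fun d item => if item.2.1 < bud && item.2.2 < dist then d.insert item.1 item.2.1 else d)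
    PySem.Dict.empty).items

-- ===== PRECONDITION & SPEC =====
def Spec_friendsgiving (lst : List (String × Int × Int)) (bud : Int) (dist : Int) (out : List (String × Int)) : Prop := out = friendsgiving_alt lst bud dist
instance (lst : List (String × Int × Int)) (bud : Int) (dist : Int) (out : List (String × Int)) : Decidable (Spec_friendsgiving lst bud dist out) := by unfold Spec_friendsgiving; infer_instance

-- ===== CLAIM (what is proved, stated in full; the proofs are below) =====
def Claim_equal_friendsgiving : Prop := ∀ (lst : List (String × Int × Int)) (bud : Int) (dist : Int), Dom_friendsgiving lst bud dist → Spec_friendsgiving lst bud dist (friendsgiving lst bud dist)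

-- ===== LEMMAS AND PROOFS =====
theorem friendsgiving_fold_eq_rec (lst : List (String × Int × Int)) (bud : Int) (dist : Int) :
    lst.reverse.foldl
      (fun d item => if item.2.1 < bud && item.2.2 < dist then d.insert item.1 item.2.1 else d)
      PySem.Dict.empty = friendsgivingRec lst bud dist := by
  induction lst with
  | nil => rfl
  | cons x rest ih =>
    simp only [List.reverse_cons, List.foldl_append, List.foldl_cons, List.foldl_nil, ih,
      friendsgivingRec]
    by_cases h1 : x.2.1 < bud <;> by_cases h2 : x.2.2 < dist <;> simp [h1, h2]

-- ===== VERDICT (by name: the statement is the Claim_ definition above) =====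
theorem friendsgiving_spec : Claim_equal_friendsgiving := by
  intro lst bud dist _
  unfold Spec_friendsgiving friendsgiving friendsgiving_alt
  rw [friendsgiving_fold_eq_rec]
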